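-- pv_equiv track=rewrite | github.com/Pduc96421/Python_code_ptit | T066.py | sobuoc
-- ===== SOURCE A (Python) =====
-- def xoay(a, b):
--     if(len(a) != len(b)):
--         return -1
--     s = a
--     for i in range(0, len(a) + 1):
--         if s == b:
--             return i
--         s = s[1 : : ] + s[0]
--     return -1
--
-- def sobuoc(a):
--     ans = 1000000
--     for i in a:
--         cnt = 0
--         for j in a:
--             tmp = xoay(j, i)
--             if tmp == -1:
--                 return -1
--             cnt += tmp
--         ans = min(ans, cnt)
--     return ans
-- ===== SOURCE B (Python) =====
-- def sobuoc(a):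
--     # Validity pass: every string must be a rotation of the first one;
--     # then each pairwise rotation count is the first index of t in s+s.
--     if not a:
--         return 1000000
--     base = a[0]
--     for s in a:
--         if len(s) != len(base) or base not in s + s:
--             return -1
--     best = 1000000
--     for t in a:
--         best = min(best, sum((s + s).find(t) for s in a))
--     return best
-- ===== Notes on version B (the rewrite author's own statement) =====
-- stated objective: alternative
-- what changed: B replaces the try-every-rotation inner loop by a single substring search of the target in the doubled string (first occurrence index = rotation count), preceded by one validity pass against a[0] instead of A's early-return inside the summing loops.
import Mathlib
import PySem

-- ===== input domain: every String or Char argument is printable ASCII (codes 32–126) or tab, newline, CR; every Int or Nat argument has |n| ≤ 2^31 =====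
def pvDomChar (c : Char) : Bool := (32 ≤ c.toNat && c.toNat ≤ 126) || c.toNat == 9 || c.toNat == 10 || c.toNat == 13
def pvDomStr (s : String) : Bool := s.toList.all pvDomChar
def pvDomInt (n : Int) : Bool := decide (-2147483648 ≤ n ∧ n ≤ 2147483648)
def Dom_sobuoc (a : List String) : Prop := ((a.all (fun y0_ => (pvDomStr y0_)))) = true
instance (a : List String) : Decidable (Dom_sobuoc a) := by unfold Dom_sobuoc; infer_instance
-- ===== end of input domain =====

-- B replaces A's try-every-rotation inner loop by one substring search in the
-- doubled string (first occurrence index = rotation count), with a validity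
-- pass against a[0] up front (objective: alternative algorithm).

-- ===== PORT A =====
-- s = s[1::] + s[0].  's.take 1' is exact here: the step is only reached when
-- s ≠ b, and for s = [] the loop's equality branch (b = [] forced by the length
-- guard) returns first, so Python's s[0] never raises on a reached state.
def xoayStep (s : List Char) : List Char :=
  PySem.List.slice s (some 1) none ++ s.take 1

def xoayLoop (b : List Char) (s : List Char) (i : Nat) (fuel : Nat) : Int :=
  match fuel with
  | 0 => -1
  | f + 1 => if s = b then (i : Int) else xoayLoop b (xoayStep s) (i + 1) f

def xoay (a b : List Char) : Int :=
  if a.length ≠ b.length then -1 else xoayLoop b a 0 (a.length + 1)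

def sobuocInner (ws : List (List Char)) (i : List Char) (cnt : Int) : Option Int :=
  match ws with
  | [] => some cnt
  | j :: rest =>
    let tmp := xoay j i
    if tmp = -1 then none else sobuocInner rest i (cnt + tmp)

def sobuocOuter (ws : List (List Char)) (rest : List (List Char)) (ans : Int) : Int :=
  match rest with
  | [] => ans
  | i :: rest' =>
    match sobuocInner ws i 0 with
    | none => -1
    | some cnt => sobuocOuter ws rest' (min ans cnt)

def sobuoc (a : List String) : Int :=
  sobuocOuter (a.map String.toList) (a.map String.toList) 1000000

-- ===== PORT B =====
def sobuoc_alt (a : List String) : Int :=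
  match a with
  | [] => 1000000
  | a0 :: _ =>
    let ws := a.map String.toList
    let base := a0.toList
    if ws.any (fun s => decide (s.length ≠ base.length) || !(PySem.Chars.isIn base (s ++ s))) then -1
    else (ws.map (fun t => (ws.map (fun s => PySem.Chars.find (s ++ s) t)).sum)).foldl min 1000000

-- ===== PRECONDITION & SPEC =====
def Spec_sobuoc (a : List String) (out : Int) : Prop := out = sobuoc_alt a
instance (a : List String) (out : Int) : Decidable (Spec_sobuoc a out) := by unfold Spec_sobuoc; infer_instance

-- ===== CLAIM (what is proved, stated in full; the proofs are below) =====
def Claim_equal_sobuoc : Prop := ∀ (a : List String), Dom_sobuoc a → Spec_sobuoc a (sobuoc a)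

-- ===== LEMMAS AND PROOFS =====

lemma xoayStep_eq_rotate (s : List Char) : xoayStep s = s.rotate 1 := by
  cases s with
  | nil => simp [xoayStep, PySem.List.slice_from_one]
  | cons c t =>
    rw [List.rotate_eq_drop_append_take (by simp)]
    simp [xoayStep, PySem.List.slice_from_one]

lemma loop_none (b a : List Char) :
    ∀ (fuel k : Nat), (∀ j < fuel, a.rotate (k + j) ≠ b) →
      xoayLoop b (a.rotate k) k fuel = -1 := by
  intro fuel
  induction fuel with
  | zero => intro k _; rfl
  | succ f ih =>
    intro k h
    have h0 : a.rotate k ≠ b := by simpa using h 0 (Nat.succ_pos f)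
    simp only [xoayLoop, if_neg h0, xoayStep_eq_rotate, List.rotate_rotate]
    exact ih (k + 1) (fun j hj => by
      have := h (j + 1) (by omega)
      simpa [Nat.add_assoc, Nat.add_comm 1 j] using this)

lemma loop_found (b a : List Char) :
    ∀ (fuel m k : Nat), m < fuel → a.rotate (k + m) = b →
      (∀ j < m, a.rotate (k + j) ≠ b) →
      xoayLoop b (a.rotate k) k fuel = ((k + m : Nat) : Int) := by
  intro fuel
  induction fuel with
  | zero => intro m k hm _ _; exact absurd hm (by omega)
  | succ f ih =>
    intro m k hm heq hmin
    cases m with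
    | zero =>
      simp only [xoayLoop]
      rw [if_pos (by simpa using heq)]
      simp
    | succ m' =>
      have h0 : a.rotate k ≠ b := by simpa using hmin 0 (Nat.succ_pos m')
      simp only [xoayLoop, if_neg h0, xoayStep_eq_rotate, List.rotate_rotate]
      have := ih m' (k + 1) (by omega)
        (by simpa [Nat.add_assoc, Nat.add_comm 1 m'] using heq)
        (fun j hj => by
          have := hmin (j + 1) (by omega)
          simpa [Nat.add_assoc, Nat.add_comm 1 j] using this)
      rw [this]; congr 1; omega

-- rotate k s (k ≤ |s|) sits inside s ++ s starting at position k
lemma rotate_prefix_drop (s : List Char) (k : Nat) (hk : k ≤ s.length) :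
    s.rotate k <+: (s ++ s).drop k := by
  rw [List.rotate_eq_drop_append_take hk, List.drop_append_of_le_length hk]
  exact ⟨s.drop k, by simp⟩

lemma drop_doubled (s : List Char) (k : Nat) (hk : k ≤ s.length) :
    (s ++ s).drop k = s.drop k ++ s :=
  List.drop_append_of_le_length hk

-- a prefix of (s++s).drop k of length |s| is exactly rotate k s (for k ≤ |s|)
lemma prefix_drop_eq_rotate (s t : List Char) (k : Nat) (hk : k ≤ s.length)
    (hlen : s.length = t.length) (h : t <+: (s ++ s).drop k) :
    s.rotate k = t := by
  have h1 : (s.drop k).length ≤ t.length := by simp; omega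
  have hts : t = ((s ++ s).drop k).take t.length := List.prefix_iff_eq_take.mp h
  rw [drop_doubled s k hk, List.take_append, List.take_of_length_le h1,
      show t.length - (s.drop k).length = k from by simp; omega] at hts
  rw [List.rotate_eq_drop_append_take hk]
  exact hts.symm

lemma key_eq (s t : List Char) (hlen : s.length = t.length) :
    xoay s t = PySem.Chars.find (s ++ s) t := by
  unfold xoay
  rw [if_neg (by omega)]
  by_cases hf : 0 ≤ PySem.Chars.find (s ++ s) t
  · -- found at m := toNat
    set F := PySem.Chars.find (s ++ s) t with hFdef
    obtain ⟨hpre, hmin⟩ := PySem.Chars.find_spec (s := s ++ s) (sub := t) hf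
    have hm_le : F.toNat ≤ s.length := by
      have h2 := hpre.length_le
      rw [List.length_drop, List.length_append] at h2
      have h3 := PySem.Chars.find_le_length (s := s ++ s) (sub := t)
      rw [List.length_append] at h3
      omega
    have hrot : s.rotate F.toNat = t :=
      prefix_drop_eq_rotate s t F.toNat hm_le hlen hpre
    have hminrot : ∀ j < F.toNat, s.rotate j ≠ t := by
      intro j hj hrj
      exact hmin j hj (hrj ▸ rotate_prefix_drop s j (by omega))
    have hlp := loop_found t s (s.length + 1) F.toNat 0 (by omega)
      (by simpa using hrot) (fun j hj => by simpa using hminrot j hj)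
    simp only [List.rotate_zero, Nat.zero_add] at hlp
    rw [hlp]; omega
  · -- not found
    have hF : PySem.Chars.find (s ++ s) t = -1 := by
      have := PySem.Chars.neg_one_le_find (s := s ++ s) (sub := t)
      omega
    rw [hF]
    have hninf : ¬ t <:+: (s ++ s) := (PySem.Chars.find_eq_neg_one_iff _ _).mp hF
    have hnone : ∀ j, s.rotate (0 + j) ≠ t := by
      intro j hrj
      apply hninf
      rcases eq_or_ne s ([] : List Char) with h0 | h0
      · subst h0
        simp at hrj
        simp [hrj]
      · have hj' : s.rotate (j % s.length) = t := by
          rw [← List.rotate_mod]; simpa using hrj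
        have hle : j % s.length ≤ s.length :=
          le_of_lt (Nat.mod_lt _ (List.length_pos_of_ne_nil h0))
        exact (hj' ▸ rotate_prefix_drop s (j % s.length) hle).isInfix.trans
          (List.drop_suffix _ _).isInfix
    have hlp := loop_none t s (s.length + 1) 0 (fun j _ => hnone j)
    simpa using hlp

-- rotation (with equal lengths) ↔ infix of the doubled string
lemma rot_iff_infix (s t : List Char) (hlen : s.length = t.length) :
    s ~r t ↔ t <:+: (s ++ s) := by
  constructor
  · intro h
    obtain ⟨n, hn, hrot⟩ := List.isRotated_iff_mod.mp h
    exact (hrot ▸ rotate_prefix_drop s n hn).isInfix.trans (List.drop_suffix _ _).isInfix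
  · intro h
    obtain ⟨pre, post, hps⟩ := h
    have hpre : t <+: (s ++ s).drop pre.length := by
      rw [← hps, List.append_assoc, List.drop_left]
      exact ⟨post, rfl⟩
    have hple : pre.length ≤ s.length := by
      have := congrArg List.length hps
      simp at this
      omega
    exact ⟨pre.length, prefix_drop_eq_rotate s t pre.length hple hlen hpre⟩

lemma inner_some (t : List Char) :
    ∀ (ws : List (List Char)) (c : Int), (∀ j ∈ ws, xoay j t ≠ -1) →
      sobuocInner ws t c = some (c + (ws.map (fun s => xoay s t)).sum) := by
  intro ws
  induction ws with
  | nil => intro c _; simp [sobuocInner]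
  | cons j rest ih =>
    intro c h
    have hj : xoay j t ≠ -1 := h j (by simp)
    simp only [sobuocInner, if_neg hj]
    rw [ih (c + xoay j t) (fun j' hj' => h j' (by simp [hj']))]
    simp [add_assoc]

lemma inner_none_of_bad (t : List Char) :
    ∀ (ws : List (List Char)) (c : Int), (∃ j ∈ ws, xoay j t = -1) →
      sobuocInner ws t c = none := by
  intro ws
  induction ws with
  | nil => intro c h; simp at h
  | cons j rest ih =>
    intro c h
    by_cases hj : xoay j t = -1
    · simp [sobuocInner, hj]
    · simp only [sobuocInner, if_neg hj]
      rcases h with ⟨j', hj', hje⟩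
      rcases List.mem_cons.mp hj' with h | h
      · exact absurd (h ▸ hje) hj
      · exact ih _ ⟨j', h, hje⟩

lemma outer_fold (ws : List (List Char)) (f : List Char → Int) :
    ∀ (rest : List (List Char)) (ans : Int),
      (∀ t ∈ rest, sobuocInner ws t 0 = some (f t)) →
      sobuocOuter ws rest ans = (rest.map f).foldl min ans := by
  intro rest
  induction rest with
  | nil => intro ans _; rfl
  | cons t rest' ih =>
    intro ans h
    simp only [sobuocOuter, h t (by simp), List.map_cons, List.foldl_cons]
    exact ih _ (fun t' ht' => h t' (by simp [ht']))

-- the whole computation, on the char-list side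
lemma main_eq (base : List Char) (ws' : List (List Char)) :
    sobuocOuter (base :: ws') (base :: ws') 1000000 =
      if (base :: ws').any
          (fun s => decide (s.length ≠ base.length) || !(PySem.Chars.isIn base (s ++ s))) then -1
      else ((base :: ws').map
          (fun t => ((base :: ws').map (fun s => PySem.Chars.find (s ++ s) t)).sum)).foldl min 1000000 := by
  by_cases hbad : ((base :: ws').any
      (fun s => decide (s.length ≠ base.length) || !(PySem.Chars.isIn base (s ++ s)))) = true
  · rw [if_pos hbad]
    obtain ⟨s, hs, hsp⟩ := List.any_eq_true.mp hbad
    have hsbad : xoay s base = -1 := by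
      by_cases hl : s.length = base.length
      · have hni : PySem.Chars.isIn base (s ++ s) = false := by
          simp [hl] at hsp
          simpa using hsp
        rw [key_eq s base hl]
        exact (PySem.Chars.find_eq_neg_one_iff _ _).mpr
          ((PySem.Chars.isIn_eq_false_iff _ _).mp hni)
      · simp [xoay, hl]
    have hnone : sobuocInner (base :: ws') base 0 = none :=
      inner_none_of_bad base (base :: ws') 0 ⟨s, hs, hsbad⟩
    simp only [sobuocOuter, hnone]
  · rw [if_neg hbad]
    have hgood : ∀ s ∈ (base :: ws'), s.length = base.length ∧ s ~r base := by
      intro s hs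
      have hno := List.any_eq_false.mp (Bool.not_eq_true _ ▸ hbad) s hs
      simp only [Bool.or_eq_true, decide_eq_true_eq, Bool.not_eq_true', not_or, not_not,
        Bool.not_eq_false] at hno
      exact ⟨hno.1, (rot_iff_infix s base hno.1).mpr
        ((PySem.Chars.isIn_iff_infix _ _).mp hno.2)⟩
    have hpair : ∀ s ∈ (base :: ws'), ∀ t ∈ (base :: ws'),
        xoay s t = PySem.Chars.find (s ++ s) t ∧ PySem.Chars.find (s ++ s) t ≠ -1 := by
      intro s hs t ht
      have hst : s ~r t := (hgood s hs).2.trans (hgood t ht).2.symm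
      have hlen : s.length = t.length := hst.perm.length_eq
      refine ⟨key_eq s t hlen, ?_⟩
      rw [Ne, PySem.Chars.find_eq_neg_one_iff]
      exact not_not.mpr ((rot_iff_infix s t hlen).mp hst)
    have hinner : ∀ t ∈ (base :: ws'), sobuocInner (base :: ws') t 0 =
        some (((base :: ws').map (fun s => PySem.Chars.find (s ++ s) t)).sum) := by
      intro t ht
      rw [inner_some t (base :: ws') 0 (fun j hj => by
        rw [(hpair j hj t ht).1]; exact (hpair j hj t ht).2)]
      rw [zero_add, List.map_congr_left (fun j hj => (hpair j hj t ht).1)]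
    exact outer_fold (base :: ws') _ (base :: ws') 1000000 hinner

-- ===== VERDICT (by name: the statement is the Claim_ definition above) =====
theorem sobuoc_spec : Claim_equal_sobuoc := by
  intro a _
  unfold Spec_sobuoc
  cases a with
  | nil => rfl
  | cons a0 rest =>
    exact main_eq a0.toList (rest.map String.toList)
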